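-- pv_equiv track=rewrite | github.com/nicholaswisee/Praktikum-Berpikir-Komputasional-2024 | praktikum-3/P03_19624066_02.py | genap
-- ===== SOURCE A (Python) =====
-- def genap(n): #definisikan fungsi yang akan menghitung jumlah angka pada digit genap
--     posisi = 1
--     sum_genap = 0
--     while n > 0:
--         if posisi % 2 == 0:
--             sum_genap += n % 10
--         posisi += 1
--         n //= 10
--     return sum_genap
-- ===== SOURCE B (Python) =====
-- def genap(n):
--     # Sum of digits at even positions (counted from the units digit = position 1):
--     # drop the units digit, then sum every other digit of what remains.
--     def every_other(m):
--         return 0 if m <= 0 else m % 10 + every_other(m // 100)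
--     return every_other(n // 10) if n > 0 else 0
-- ===== Notes on version B (the rewrite author's own statement) =====
-- stated objective: simpler
-- what changed: Replaces the while-loop with a position-parity counter by a recursion that first drops the units digit and then consumes two digits per step, eliminating the parity state entirely.
import Mathlib
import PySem

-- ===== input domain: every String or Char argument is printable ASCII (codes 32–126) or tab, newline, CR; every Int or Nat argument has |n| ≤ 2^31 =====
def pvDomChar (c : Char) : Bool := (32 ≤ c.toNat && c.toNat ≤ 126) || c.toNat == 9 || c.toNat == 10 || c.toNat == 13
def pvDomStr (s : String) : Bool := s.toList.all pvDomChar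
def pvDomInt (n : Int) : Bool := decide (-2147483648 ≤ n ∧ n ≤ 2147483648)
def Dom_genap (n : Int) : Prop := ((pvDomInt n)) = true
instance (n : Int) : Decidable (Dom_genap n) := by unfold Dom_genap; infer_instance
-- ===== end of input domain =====

-- B replaces A's parity-counter while-loop by a recursion that drops the units digit and then
-- consumes two digits per step (simpler: no position state); same values everywhere.

-- ===== PORT A =====
-- while n > 0: if posisi % 2 == 0: sum_genap += n % 10; posisi += 1; n //= 10
def genapLoop (n posisi sum_genap : Int) : Int :=
  if n > 0 then
    genapLoop (PySem.Int.floordiv n 10) (posisi + 1)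
      (if PySem.Int.mod posisi 2 = 0 then sum_genap + PySem.Int.mod n 10 else sum_genap)
  else sum_genap
termination_by n.toNat
decreasing_by
  rw [PySem.Int.floordiv_eq_ediv_of_pos (by norm_num)]
  omega

def genap (n : Int) : Int := genapLoop n 1 0

-- ===== PORT B =====
-- def every_other(m): return 0 if m <= 0 else m % 10 + every_other(m // 100)
def everyOther (m : Int) : Int :=
  if m ≤ 0 then 0
  else PySem.Int.mod m 10 + everyOther (PySem.Int.floordiv m 100)
termination_by m.toNat
decreasing_by
  rw [PySem.Int.floordiv_eq_ediv_of_pos (by norm_num)]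
  omega

def genap_alt (n : Int) : Int := if n > 0 then everyOther (PySem.Int.floordiv n 10) else 0

-- ===== PRECONDITION & SPEC =====
def Spec_genap (n : Int) (out : Int) : Prop := out = genap_alt n
instance (n : Int) (out : Int) : Decidable (Spec_genap n out) := by unfold Spec_genap; infer_instance

-- ===== CLAIM (what is proved, stated in full; the proofs are below) =====
def Claim_equal_genap : Prop := ∀ (n : Int), Dom_genap n → Spec_genap n (genap n)

-- ===== LEMMAS AND PROOFS =====

theorem everyOther_nonpos {m : Int} (h : m ≤ 0) : everyOther m = 0 := by
  rw [everyOther]; simp [h]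

theorem loop_eq : ∀ (k : Nat) (n p s : Int), n.toNat ≤ k →
    genapLoop n p s =
      s + (if p % 2 = 0 then everyOther n else everyOther (PySem.Int.floordiv n 10)) := by
  intro k
  induction k with
  | zero =>
    intro n p s hk
    have hn : n ≤ 0 := by omega
    rw [genapLoop]
    have h10 : PySem.Int.floordiv n 10 = n / 10 :=
      PySem.Int.floordiv_eq_ediv_of_pos (by norm_num)
    have : n / 10 ≤ 0 := by omega
    simp [show ¬ n > 0 by omega, everyOther_nonpos hn, h10, everyOther_nonpos this]
  | succ k ih =>
    intro n p s hk
    by_cases hn : n > 0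
    · rw [genapLoop]
      have h10 : PySem.Int.floordiv n 10 = n / 10 :=
        PySem.Int.floordiv_eq_ediv_of_pos (by norm_num)
      have hmodp : PySem.Int.mod p 2 = p % 2 := PySem.Int.mod_eq_emod_of_pos (by norm_num)
      have hrec := ih (n / 10) (p + 1) ; simp only [h10]
      by_cases hp : p % 2 = 0
      · simp only [hn, if_pos, dif_pos, hmodp, hp]
        rw [ih (n / 10) (p + 1) _ (by omega)]
        have hp1 : (p + 1) % 2 ≠ 0 := by omega
        rw [if_neg hp1]
        have h100 : PySem.Int.floordiv (n / 10) 10 = n / 100 := by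
          rw [PySem.Int.floordiv_eq_ediv_of_pos (by norm_num)]
          omega
        rw [h100]
        conv_rhs => rw [everyOther]
        have hmn : PySem.Int.mod n 10 = n % 10 := PySem.Int.mod_eq_emod_of_pos (by norm_num)
        have h100' : PySem.Int.floordiv n 100 = n / 100 :=
          PySem.Int.floordiv_eq_ediv_of_pos (by norm_num)
        simp [show ¬ n ≤ 0 by omega, hmn]
        ring
      · simp only [hn, dif_pos, hmodp, hp, if_false]
        rw [ih (n / 10) (p + 1) _ (by omega)]
        have hp1 : (p + 1) % 2 = 0 := by omega
        simp [hp1, h10]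
    · rw [genapLoop]
      have hn0 : n ≤ 0 := by omega
      have h10 : PySem.Int.floordiv n 10 = n / 10 :=
        PySem.Int.floordiv_eq_ediv_of_pos (by norm_num)
      have : n / 10 ≤ 0 := by omega
      simp [hn, everyOther_nonpos hn0, h10, everyOther_nonpos this]

-- ===== VERDICT (by name: the statement is the Claim_ definition above) =====
theorem genap_spec : Claim_equal_genap := by
  intro n _
  unfold Spec_genap genap genap_alt
  rw [loop_eq n.toNat n 1 0 le_rfl]
  by_cases hn : n > 0
  · simp [show (1 : Int) % 2 ≠ 0 by decide, hn]
  · have hn0 : n ≤ 0 := by omega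
    have h10 : PySem.Int.floordiv n 10 = n / 10 :=
      PySem.Int.floordiv_eq_ediv_of_pos (by norm_num)
    have : n / 10 ≤ 0 := by omega
    simp [hn, h10, everyOther_nonpos this]
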